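-- pv_equiv track=rewrite | github.com/sampoprock/GeeksforGeeks | find_transition_point.py | transitionPoint
-- ===== SOURCE A (Python) =====
-- def transitionPoint(arr, n):
--     #Code here
--     if arr[0]==1:
--         return 0
--     l=0
--     r=n-1
--     while(l<=r):
--        mid=(l+r)//2
--        if(arr[mid]==0):
--            l=mid+1
--        elif (arr[mid]==1):
--            if arr[mid-1]==0:
--                return mid
--            r=mid-1
--     return -1
-- ===== SOURCE B (Python) =====
-- def transitionPoint(arr, n):
--     if arr[0] == 1:
--         return 0
--     for i in range(1, n):
--         if arr[i] == 1:
--             return i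
--     return -1
-- ===== Notes on version B (the rewrite author's own statement) =====
-- stated objective: simpler
-- what changed: Replaces the interval-halving binary search over [l, r] with a single left-to-right linear scan that returns the first index holding a 1.
-- outside the precondition, e.g. on transitionPoint([0, 0, 0, 0, 1, 0, 1], 7): A returns 6, B returns 4; on transitionPoint([1, 5], 2): A returns 0, B returns 0; on transitionPoint([1], 5): A returns 0, B returns 0
import Mathlib
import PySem

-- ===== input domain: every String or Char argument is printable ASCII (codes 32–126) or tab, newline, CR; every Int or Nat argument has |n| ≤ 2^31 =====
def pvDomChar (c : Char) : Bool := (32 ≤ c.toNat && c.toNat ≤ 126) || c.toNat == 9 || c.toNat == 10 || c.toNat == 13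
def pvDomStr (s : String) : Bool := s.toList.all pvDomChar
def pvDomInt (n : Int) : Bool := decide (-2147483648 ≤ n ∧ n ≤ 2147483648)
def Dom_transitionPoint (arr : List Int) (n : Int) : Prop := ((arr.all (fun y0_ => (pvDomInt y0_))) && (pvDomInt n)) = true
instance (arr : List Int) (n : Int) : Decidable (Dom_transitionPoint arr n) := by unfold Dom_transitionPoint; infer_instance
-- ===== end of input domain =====

-- B replaces A's binary search with a single left-to-right linear scan (simpler; same return value on the stated domain).

-- ===== PORT A =====
-- while(l<=r): … ; fuel bounds the iteration count (the interval shrinks each step inside Pre_,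
-- so n.toNat+1 iterations always suffice there); the fuel-0 and `none` branches are unreachable
-- inside Pre_, and the final `else -1` is where Python loops forever on a non-0/1 value (outside Pre_).
def tpLoop (arr : List Int) (l r : Int) (fuel : Nat) : Int :=
  match fuel with
  | 0 => -1
  | f + 1 =>
    if l ≤ r then
      let mid := PySem.Int.floordiv (l + r) 2
      match PySem.List.pyGet? arr mid with
      | none => -1
      | some v =>
        if v == 0 then tpLoop arr (mid + 1) r f
        else if v == 1 then
          match PySem.List.pyGet? arr (mid - 1) with
          | none => -1
          | some w => if w == 0 then mid else tpLoop arr l (mid - 1) f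
        else -1
    else -1

def transitionPoint (arr : List Int) (n : Int) : Int :=
  match PySem.List.pyGet? arr 0 with
  | none => -1  -- IndexError on empty arr: excluded by Pre_
  | some a0 =>
    if a0 == 1 then 0
    else tpLoop arr 0 (n - 1) (n.toNat + 1)

-- ===== PORT B =====
-- for i in range(1, n): if arr[i] == 1: return i  (the `none` branch is unreachable inside Pre_)
def tpScan (arr : List Int) : List Int → Int
  | [] => -1
  | i :: rest =>
    match PySem.List.pyGet? arr i with
    | none => -1
    | some v => if v == 1 then i else tpScan arr rest

def transitionPoint_alt (arr : List Int) (n : Int) : Int :=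
  match PySem.List.pyGet? arr 0 with
  | none => -1  -- IndexError on empty arr: excluded by Pre_
  | some a0 =>
    if a0 == 1 then 0
    else tpScan arr (PySem.List.pyRange 1 n 1)

-- ===== PRECONDITION & SPEC =====
-- Pre_ restricts to the function's stated domain (nonempty sorted 0/1 array searched on its first n
-- elements, n ≤ len(arr)): outside it A raises IndexError (empty array, or n > len(arr) reached by
-- the search), loops forever (a non-0/1 value at a probed index), or — on an unsorted prefix — the
-- binary search returns an accidental index that is not the first transition point.
def Pre_transitionPoint (arr : List Int) (n : Int) : Prop :=
  arr ≠ [] ∧ n ≤ (arr.length : Int) ∧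
  (∀ x ∈ arr.take n.toNat, x = 0 ∨ x = 1) ∧
  List.Pairwise (· ≤ ·) (arr.take n.toNat)
instance (arr : List Int) (n : Int) : Decidable (Pre_transitionPoint arr n) := by
  unfold Pre_transitionPoint; infer_instance

def pvWitness_transitionPoint : List Int × Int := ([0, 0, 1, 1], 4)

def Spec_transitionPoint (arr : List Int) (n : Int) (out : Int) : Prop := out = transitionPoint_alt arr n
instance (arr : List Int) (n : Int) (out : Int) : Decidable (Spec_transitionPoint arr n out) := by unfold Spec_transitionPoint; infer_instance

-- ===== CLAIM (what is proved, stated in full; the proofs are below) =====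
def Claim_equal_transitionPoint : Prop := ∀ (arr : List Int) (n : Int), Dom_transitionPoint arr n → Pre_transitionPoint arr n → Spec_transitionPoint arr n (transitionPoint arr n)

-- ===== LEMMAS AND PROOFS =====

-- A sorted 0/1 list has some k leading zeros followed only by ones.
lemma binChar (p : List Int) (hb : ∀ x ∈ p, x = 0 ∨ x = 1) (hs : List.Pairwise (· ≤ ·) p) :
    ∃ k : Nat, ∀ (i : Nat) (hi : i < p.length),
      p[i] = if (i : Int) < (k : Int) then 0 else 1 := by
  induction p with
  | nil => exact ⟨0, fun i hi => by simp at hi⟩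
  | cons a t ih =>
    rcases hb a List.mem_cons_self with ha | ha
    · obtain ⟨k, hk⟩ := ih (fun x hx => hb x (List.mem_cons_of_mem _ hx))
        (List.pairwise_cons.mp hs).2
      subst ha
      refine ⟨k + 1, fun i hi => ?_⟩
      cases i with
      | zero => simp
      | succ j =>
        have hj : j < t.length := by simpa using hi
        simp only [List.getElem_cons_succ, hk j hj]
        split_ifs with h1 h2 h2 <;> first | rfl | (exfalso; push_cast at *; omega)
    · subst ha
      have hall : ∀ x ∈ t, x = 1 := by
        intro x hx
        rcases hb x (List.mem_cons_of_mem _ hx) with h0 | h1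
        · have := (List.pairwise_cons.mp hs).1 x hx; omega
        · exact h1
      refine ⟨0, fun i hi => ?_⟩
      cases i with
      | zero => simp
      | succ j =>
        have hj : j < t.length := by simpa using hi
        simp only [List.getElem_cons_succ]
        rw [hall t[j] (List.getElem_mem hj),
          if_neg (show ¬ (((j + 1 : Nat) : Int) < ((0 : Nat) : Int)) by push_cast; omega)]

-- A's loop computes (k ≤ r ? k : -1), k the first index holding a 1.
lemma tpLoop_eq (arr : List Int) (n k : Int) (hk : 1 ≤ k)
    (hchar : ∀ j : Int, 0 ≤ j → j < n →
      PySem.List.pyGet? arr j = some (if j < k then 0 else 1)) :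
    ∀ (fuel : Nat) (l r : Int), 0 ≤ l → l ≤ k → r < n → (r + 1 - l).toNat ≤ fuel →
      tpLoop arr l r fuel = if k ≤ r then k else -1 := by
  intro fuel
  induction fuel with
  | zero =>
    intro l r h0 hlk hrn hf
    have : ¬ k ≤ r := by omega
    simp [tpLoop, this]
  | succ f ih =>
    intro l r h0 hlk hrn hf
    by_cases hlr : l ≤ r
    · obtain ⟨hm1, hm2⟩ := PySem.Int.floordiv_two_mid_bounds hlr
      set mid := PySem.Int.floordiv (l + r) 2 with hmid
      have hmn : mid < n := by omega
      have hget := hchar mid (by omega) hmn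
      by_cases hmk : mid < k
      · have : tpLoop arr l r (f + 1) = tpLoop arr (mid + 1) r f := by
          simp only [tpLoop, if_pos hlr, ← hmid, hget, if_pos hmk]
          norm_num
        rw [this, ih (mid + 1) r (by omega) (by omega) hrn (by omega)]
      · have hv : (if mid < k then (0 : Int) else 1) = 1 := by simp [hmk]
        have hget1 := hchar (mid - 1) (by omega) (by omega)
        by_cases hmk2 : mid - 1 < k
        · -- mid = k : return mid
          have hme : mid = k := by omega
          have : tpLoop arr l r (f + 1) = mid := by
            simp only [tpLoop, if_pos hlr, ← hmid, hget, hv, hget1, if_pos hmk2]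
            norm_num
          rw [this, hme, if_pos (by omega)]
        · have : tpLoop arr l r (f + 1) = tpLoop arr l (mid - 1) f := by
            simp only [tpLoop, if_pos hlr, ← hmid, hget, hv, hget1, if_neg hmk2]
            norm_num
          rw [this, ih l (mid - 1) h0 hlk (by omega) (by omega),
            if_pos (by omega), if_pos (by omega)]
    · have : ¬ k ≤ r := by omega
      simp [tpLoop, hlr, this]

-- B's scan from index j computes (k ≤ n-1 ? k : -1) whenever j ≤ k.
lemma tpScan_eq (arr : List Int) (n k : Int)
    (hchar : ∀ j : Int, 0 ≤ j → j < n →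
      PySem.List.pyGet? arr j = some (if j < k then 0 else 1)) :
    ∀ (m : Nat) (j : Int), 1 ≤ j → j ≤ k → (n - j).toNat ≤ m →
      tpScan arr (PySem.List.pyRange j n 1) = if k ≤ n - 1 then k else -1 := by
  intro m
  induction m with
  | zero =>
    intro j h1 hjk hm
    rw [PySem.List.pyRange_one_eq_nil (by omega)]
    have : ¬ k ≤ n - 1 := by omega
    simp [tpScan, this]
  | succ m ih =>
    intro j h1 hjk hm
    by_cases hjn : j < n
    · rw [PySem.List.pyRange_one_cons hjn]
      have hget := hchar j (by omega) hjn
      by_cases hjlt : j < k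
      · have : tpScan arr (j :: PySem.List.pyRange (j + 1) n 1)
            = tpScan arr (PySem.List.pyRange (j + 1) n 1) := by
          simp only [tpScan, hget, if_pos hjlt]
          norm_num
        rw [this, ih (j + 1) (by omega) (by omega) (by omega)]
      · have hje : j = k := by omega
        have hv : (if j < k then (0 : Int) else 1) = 1 := by simp [hjlt]
        have : tpScan arr (j :: PySem.List.pyRange (j + 1) n 1) = j := by
          simp only [tpScan, hget, hv]
          norm_num
        rw [this, hje, if_pos (by omega)]
    · rw [PySem.List.pyRange_one_eq_nil (by omega)]
      have : ¬ k ≤ n - 1 := by omega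
      simp [tpScan, this]

-- ===== VERDICT (by name: the statement is the Claim_ definition above) =====
theorem transitionPoint_spec : Claim_equal_transitionPoint := by
  intro arr n _ hpre
  obtain ⟨hne, hlen, hbin, hsort⟩ := hpre
  unfold Spec_transitionPoint transitionPoint transitionPoint_alt
  have hlen0 : 0 < arr.length := List.length_pos_of_ne_nil hne
  have hget0 : PySem.List.pyGet? arr 0 = some arr[0] := by
    have := PySem.List.pyGet?_natCast arr 0
    simpa [List.getElem?_eq_getElem hlen0] using this
  rw [hget0]
  by_cases ha0 : arr[0] = 1
  · simp [ha0]
  · have ha0b : (arr[0] == 1) = false := by simp [ha0]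
    simp only [ha0b, Bool.false_eq_true, if_false]
    by_cases hn : n ≤ 0
    · rw [PySem.List.pyRange_one_eq_nil (by omega)]
      have h1 : ¬ (0 : Int) ≤ n - 1 := by omega
      simp only [tpLoop, tpScan]
      rw [if_neg h1]
    · rw [not_le] at hn
      set p := arr.take n.toNat with hp
      have hpl : p.length = n.toNat := by
        rw [hp, List.length_take]; omega
      obtain ⟨k0, hchar0⟩ := binChar p hbin hsort
      set k : Int := (k0 : Int) with hkdef
      have hchar : ∀ j : Int, 0 ≤ j → j < n →
          PySem.List.pyGet? arr j = some (if j < k then 0 else 1) := by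
        intro j hj0 hjn
        have hjl : j.toNat < arr.length := by omega
        have hjp : j.toNat < p.length := by omega
        have hg : PySem.List.pyGet? arr j = some arr[j.toNat] := by
          have h1 := PySem.List.pyGet?_natCast arr j.toNat
          have h2 : ((j.toNat : Nat) : Int) = j := by omega
          rw [h2] at h1
          simpa [List.getElem?_eq_getElem hjl] using h1
        have hc := hchar0 j.toNat hjp
        simp only [hp, List.getElem_take] at hc
        have h3 : ((j.toNat : Nat) : Int) = j := by omega
        rw [hg, hc, h3]
      have hk1 : 1 ≤ k := by
        by_contra hlt
        have := hchar 0 le_rfl hn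
        have hko : ¬ ((0 : Int) < k) := by omega
        rw [if_neg hko, hget0] at this
        simp at this
        exact ha0 this
      rw [tpLoop_eq arr n k hk1 hchar (n.toNat + 1) 0 (n - 1) le_rfl (by omega)
            (by omega) (by omega),
          tpScan_eq arr n k hchar (n - 1).toNat 1 le_rfl (by omega) (by omega)]
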